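/- GENERATED by farm/mkstatement.py from design/units.tsv (unit `start_decoder.8`) and the assertions of Vorbis/Spec/StartDecoderA.lean — do not edit.
   THE STATEMENT of the proof unit `start_decoder.8`: segment 8 of `start_decoder` (26 instructions; entries 0x114127;
   exits 0x113b22,0x114184; ranges 0x114127-0x114182 + 0x1141ad-0x1141ba)
   takes each of its entry assertions to one of its exit assertions (`Vorbis.Spec.StartDecoder.Seg8`), given the contracts of its callees.
   What the names mean: Vorbis/Spec/Basic.lean (the shared hypotheses), Vorbis/Spec/StartDecoderA.lean (the assertions). The theorem to prove:
   `theorem start_decoder_8_ok : Vorbis.Spec.start_decoder_8.Statement`. -/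
import Vorbis.Spec.Leaves
import Vorbis.Spec.Reader
import Vorbis.Spec.StartDecoderA
namespace Vorbis.Spec.start_decoder_8
open X86 X86.User Asan

/-- The statement of unit `start_decoder.8`. -/
def Statement : Prop :=
  ∀ (Lay : Layout) (_hLay : Lay.hi = 0x1000000) (μ : Microarch) (_hμ : UserX.MicroOK μ) (u₀ : State)
    (_hcode : HasCodeNat Lay u₀ Vorbis.L.start_decoder.entry Vorbis.Code.code_start_decoder.nat Vorbis.L.start_decoder.size)
    (_h_get8_packet : ∀ (others : List Obj) (frames : List (Nat × FrameLayout)) (Blk : Block → Prop) (len : Nat), Calls Lay μ Vorbis.WayInv (Vorbis.conv u₀) Vorbis.L.get8_packet.entry (Vorbis.Spec.get8_packet.spec others frames Blk len))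
    (_h_asan_load1_noabort : Asan.SmallCheck Lay μ Vorbis.WayInv (Vorbis.CodeOK u₀) [.rax, .rdx] 1 Vorbis.L.__asan_load1_noabort.entry)
    (_h_skip : ∀ (others : List Obj) (frames : List (Nat × FrameLayout)) (Blk : Block → Prop) (len : Nat), Calls Lay μ Vorbis.WayInv (Vorbis.conv u₀) Vorbis.L.skip.entry (Vorbis.Spec.skip.spec others frames Blk len))
    (_h_next_segment : ∀ (others : List Obj) (frames : List (Nat × FrameLayout)) (Blk : Block → Prop) (len : Nat), Calls Lay μ Vorbis.WayInv (Vorbis.conv u₀) Vorbis.L.next_segment.entry (Vorbis.Spec.next_segment.spec others frames Blk len))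
    (_h_asan_store1_noabort : Asan.SmallCheck Lay μ Vorbis.WayInv (Vorbis.CodeOK u₀) [.rax, .rdx] 1 Vorbis.L.__asan_store1_noabort.entry)
    (_h_error : ∀ (others : List Obj) (frames : List (Nat × FrameLayout)), Calls Lay μ Vorbis.WayInv (Vorbis.conv u₀) Vorbis.L.error.entry (Vorbis.Spec.error.spec others frames)),
    Vorbis.Spec.StartDecoder.Seg8 Lay μ u₀

end Vorbis.Spec.start_decoder_8
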